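-- pv_equiv track=rewrite | github.com/singh-jagjot/DS_Algo | algoexpert/Medium/Sweet_And_Savory.py | sweetAndSavory
-- ===== SOURCE A (Python) =====
-- def sweetAndSavory(dishes, target):
--     # Write your code here.
--     sweetDishes = []
--     savoryDishes = []
--     for dish in dishes:
--         if dish < 0:
--             sweetDishes.append(dish)
--         else:
--             savoryDishes.append(dish)
--     sweetDishes.sort(key=abs)
--     savoryDishes.sort()
--     bestDiff = float('inf')
--     fianlDishes = [0, 0]
--     sweetIdx = savoryIdx = 0
--     while sweetIdx < len(sweetDishes) and savoryIdx < len(savoryDishes):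
--         sweetDish = sweetDishes[sweetIdx]
--         savoryDish = savoryDishes[savoryIdx]
--         currentCombFlavor = sweetDish + savoryDish
--         if currentCombFlavor <= target:
--             currentDiff = target - currentCombFlavor
--             if currentDiff < bestDiff:
--                 bestDiff = currentDiff
--                 fianlDishes = [sweetDish, savoryDish]
--             savoryIdx += 1
--         else:
--             sweetIdx += 1
--     return fianlDishes
-- ===== SOURCE B (Python) =====
-- def sweetAndSavory(dishes, target):
--     # Same partition and sorts as the original, but a plain exhaustive
--     # double loop instead of the two-pointer sweep.
--     sweetDishes = sorted((d for d in dishes if d < 0), key=abs)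
--     savoryDishes = sorted(d for d in dishes if d >= 0)
--     bestDiff = float('inf')
--     finalDishes = [0, 0]
--     for sweet in sweetDishes:
--         for savory in savoryDishes:
--             comb = sweet + savory
--             if comb <= target and target - comb < bestDiff:
--                 bestDiff = target - comb
--                 finalDishes = [sweet, savory]
--     return finalDishes
-- ===== Notes on version B (the rewrite author's own statement) =====
-- stated objective: alternative
-- what changed: Replaces the two-pointer sweep over the two sorted lists with an exhaustive nested double loop over all sweet/savory pairs (same partition and sorts, so ties resolve identically).
import Mathlib
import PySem

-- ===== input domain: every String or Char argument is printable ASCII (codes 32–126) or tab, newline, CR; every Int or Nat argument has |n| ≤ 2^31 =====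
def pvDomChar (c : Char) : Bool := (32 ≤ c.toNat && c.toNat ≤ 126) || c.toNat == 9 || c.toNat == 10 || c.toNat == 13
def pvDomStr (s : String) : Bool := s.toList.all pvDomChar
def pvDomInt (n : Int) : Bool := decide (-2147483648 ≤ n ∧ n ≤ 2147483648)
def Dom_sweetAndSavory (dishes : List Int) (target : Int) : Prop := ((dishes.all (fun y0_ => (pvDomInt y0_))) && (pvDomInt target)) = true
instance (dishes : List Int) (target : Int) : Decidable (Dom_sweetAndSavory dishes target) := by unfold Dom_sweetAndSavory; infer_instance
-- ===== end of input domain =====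

-- B replaces A's two-pointer sweep with an exhaustive nested double loop over the
-- same sorted sweet/savory lists (alternative decomposition, not faster).

-- ===== PORT A =====
-- the while-loop: state = remaining sweet list, remaining savory list, bestDiff (none = inf), fianlDishes
def pvLoopA (target : Int) : List Int → List Int → Option Int → List Int → List Int
  | [], _, _, fin => fin
  | _ :: _, [], _, fin => fin
  | sw :: ss, sv :: vs, best, fin =>
      let comb := sw + sv
      if comb ≤ target then
        let better := match best with
          | none => true
          | some d => decide (target - comb < d)
        if better then pvLoopA target (sw :: ss) vs (some (target - comb)) [sw, sv]
        else pvLoopA target (sw :: ss) vs best fin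
      else pvLoopA target ss (sv :: vs) best fin
  termination_by ss vs _ _ => ss.length + vs.length

def sweetAndSavory (dishes : List Int) (target : Int) : List Int :=
  let part := dishes.foldl
    (fun (p : List Int × List Int) dish =>
      if dish < 0 then (p.1 ++ [dish], p.2) else (p.1, p.2 ++ [dish]))
    ([], [])
  let sweetDishes := PySem.List.sorted part.1 (fun x => |x|) false
  let savoryDishes := PySem.List.sorted part.2 (fun x => x) false
  pvLoopA target sweetDishes savoryDishes none [0, 0]

-- ===== PORT B =====
-- bestDiff is an Option Int (none = float('inf')); pvBetter = 'target - comb < bestDiff'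
def pvBetter (best : Option Int) (x : Int) : Bool :=
  match best with | none => true | some d => decide (x < d)

-- one candidate pair: update (bestDiff, finalDishes) exactly when comb <= target and it strictly improves
def pvStepB (target sw sv : Int) (st : Option Int × List Int) : Option Int × List Int :=
  let comb := sw + sv
  if comb ≤ target ∧ pvBetter st.1 (target - comb) = true then
    (some (target - comb), [sw, sv])
  else st

def sweetAndSavory_alt (dishes : List Int) (target : Int) : List Int :=
  let sweetDishes := PySem.List.sorted (dishes.filter (fun d => d < 0)) (fun x => |x|) false
  let savoryDishes := PySem.List.sorted (dishes.filter (fun d => 0 ≤ d)) (fun x => x) false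
  (sweetDishes.foldl
    (fun st sw => savoryDishes.foldl (fun st sv => pvStepB target sw sv st) st)
    ((none : Option Int), [0, 0])).2

-- ===== PRECONDITION & SPEC =====
def Spec_sweetAndSavory (dishes : List Int) (target : Int) (out : List Int) : Prop := out = sweetAndSavory_alt dishes target
instance (dishes : List Int) (target : Int) (out : List Int) : Decidable (Spec_sweetAndSavory dishes target out) := by unfold Spec_sweetAndSavory; infer_instance

-- ===== CLAIM (what is proved, stated in full; the proofs are below) =====
def Claim_equal_sweetAndSavory : Prop := ∀ (dishes : List Int) (target : Int), Dom_sweetAndSavory dishes target → Spec_sweetAndSavory dishes target (sweetAndSavory dishes target)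

-- ===== LEMMAS AND PROOFS =====

-- bound o c: the recorded best diff exists and is ≤ c
def pvBound (o : Option Int) (c : Int) : Prop := ∃ d, o = some d ∧ d ≤ c

-- a pair (sw, sv) is "dead" for state st: pvStepB leaves st unchanged, now and forever
def pvDead (target : Int) (st : Option Int × List Int) (sw sv : Int) : Prop :=
  target < sw + sv ∨ pvBound st.1 (target - (sw + sv))

def pvRowB (target sw : Int) (L : List Int) (st : Option Int × List Int) : Option Int × List Int :=
  L.foldl (fun st sv => pvStepB target sw sv st) st

lemma pvStep_dead {target sw sv : Int} {st : Option Int × List Int}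
    (h : pvDead target st sw sv) : pvStepB target sw sv st = st := by
  obtain ⟨b, f⟩ := st
  rcases h with h | ⟨d, hd, hle⟩
  · simp only [pvStepB]
    rw [if_neg]; rintro ⟨h1, _⟩; omega
  · simp only at hd; subst hd
    simp only [pvStepB, pvBetter]
    rw [if_neg]; rintro ⟨_, h2⟩; simp at h2; omega

lemma pvBound_step {target sw sv c : Int} {st : Option Int × List Int}
    (h : pvBound st.1 c) : pvBound (pvStepB target sw sv st).1 c := by
  obtain ⟨b, f⟩ := st
  obtain ⟨d, hd, hle⟩ := h
  simp only at hd; subst hd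
  simp only [pvStepB, pvBetter]
  by_cases hc : sw + sv ≤ target ∧ decide (target - (sw + sv) < d) = true
  · rw [if_pos hc]
    rcases hc with ⟨_, h2⟩; simp at h2
    exact ⟨_, rfl, by omega⟩
  · rw [if_neg hc]
    exact ⟨d, rfl, hle⟩

lemma pvStep_bound_of_le {target sw sv : Int} {st : Option Int × List Int}
    (h : sw + sv ≤ target) : pvBound (pvStepB target sw sv st).1 (target - (sw + sv)) := by
  obtain ⟨b, f⟩ := st
  simp only [pvStepB, pvBetter]
  cases b with
  | none =>
      rw [if_pos (by simp [h])]
      exact ⟨_, rfl, le_refl _⟩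
  | some d =>
      by_cases hc : sw + sv ≤ target ∧ decide (target - (sw + sv) < d) = true
      · rw [if_pos hc]
        exact ⟨_, rfl, le_refl _⟩
      · rw [if_neg hc]
        refine ⟨d, rfl, ?_⟩
        by_contra hlt
        exact hc ⟨h, by simp; omega⟩

lemma pvDead_step {target sw sv sw' sv' : Int} {st : Option Int × List Int}
    (h : pvDead target st sw' sv') : pvDead target (pvStepB target sw sv st) sw' sv' := by
  rcases h with h | h
  · exact Or.inl h
  · exact Or.inr (pvBound_step h)

lemma pvRowB_noop {target sw : Int} {L : List Int} {st : Option Int × List Int}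
    (h : ∀ sv ∈ L, pvDead target st sw sv) : pvRowB target sw L st = st := by
  induction L with
  | nil => rfl
  | cons x xs ih =>
      have hx := pvStep_dead (h x (by simp))
      unfold pvRowB
      simp only [List.foldl_cons, hx]
      exact ih (fun sv hsv => h sv (by simp [hsv]))

lemma pvRows_noop {target : Int} {S P : List Int} {st : Option Int × List Int}
    (h : ∀ sw ∈ S, ∀ sv ∈ P, pvDead target st sw sv) :
    S.foldl (fun st sw => pvRowB target sw P st) st = st := by
  induction S with
  | nil => rfl
  | cons x xs ih =>
      have hx : pvRowB target x P st = st := pvRowB_noop (h x (by simp))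
      simp only [List.foldl_cons, hx]
      exact ih (fun sw hsw => h sw (by simp [hsw]))

lemma pvRowB_append {target sw : Int} (P Q : List Int) (st : Option Int × List Int) :
    pvRowB target sw (P ++ Q) st = pvRowB target sw Q (pvRowB target sw P st) := by
  simp [pvRowB, List.foldl_append]

-- the bridge: A's inner update in the feasible case is exactly pvStepB
lemma pvStep_eq_of_le {target sw sv : Int} {best : Option Int} {fin : List Int}
    (h : sw + sv ≤ target) :
    pvStepB target sw sv (best, fin) =
      if (match best with | none => true | some d => decide (target - (sw + sv) < d)) = true
      then (some (target - (sw + sv)), [sw, sv]) else (best, fin) := by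
  simp only [pvStepB, pvBetter]
  cases best with
  | none => simp [h]
  | some d =>
      by_cases hd : decide (target - (sw + sv) < d) = true
      · rw [if_pos ⟨h, hd⟩]; simp [hd]
      · rw [if_neg (by rintro ⟨_, h2⟩; exact hd h2)]; simp [hd]

-- main invariant lemma: the two-pointer sweep equals the brute-force row folds
lemma pvLoop_eq (target : Int) : ∀ n S V P (st : Option Int × List Int),
    S.length + V.length ≤ n →
    S.Pairwise (fun a b => b ≤ a) →
    V.Pairwise (fun a b => a ≤ b) →
    (∀ sw ∈ S, ∀ sv ∈ P, pvDead target st sw sv) →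
    pvLoopA target S V st.1 st.2 =
      (S.foldl (fun st sw => pvRowB target sw (P ++ V) st) st).2 := by
  intro n
  induction n with
  | zero =>
      intro S V P st hn hS hV hINV
      have hS0 : S = [] := by cases S <;> simp_all
      subst hS0
      simp [pvLoopA]
  | succ n ih =>
      intro S V P st hn hS hV hINV
      match S, V with
      | [], _ => simp [pvLoopA]
      | sw :: ss, [] =>
          have := pvRows_noop (S := sw :: ss) (P := P ++ []) (st := st)
            (by simpa using hINV)
          rw [this]
          simp [pvLoopA]
      | sw :: ss, sv :: vs =>
          have hswmax : ∀ x ∈ sw :: ss, x ≤ sw := by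
            intro x hx
            rcases List.mem_cons.mp hx with rfl | hx
            · exact le_refl _
            · exact (List.pairwise_cons.mp hS).1 x hx
          have hsvmin : ∀ y ∈ sv :: vs, sv ≤ y := by
            intro y hy
            rcases List.mem_cons.mp hy with rfl | hy
            · exact le_refl _
            · exact (List.pairwise_cons.mp hV).1 y hy
          by_cases hle : sw + sv ≤ target
          · -- feasible: A advances savory and updates via pvStepB
            set st' := pvStepB target sw sv st with hst'
            have hA : pvLoopA target (sw :: ss) (sv :: vs) st.1 st.2 =
                pvLoopA target (sw :: ss) vs st'.1 st'.2 := by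
              conv_lhs => rw [pvLoopA.eq_def]
              simp only [if_pos hle]
              rw [hst', pvStep_eq_of_le (best := st.1) (fin := st.2) hle]
              cases hb : st.1 with
              | none => simp
              | some d =>
                  simp only [hb]
                  split <;> rfl
            have hINV' : ∀ sw' ∈ sw :: ss, ∀ sv' ∈ P ++ [sv], pvDead target st' sw' sv' := by
              intro sw' hsw' sv' hsv'
              rcases List.mem_append.mp hsv' with hsv' | hsv'
              · exact pvDead_step (hINV sw' hsw' sv' hsv')
              · have hesv : sv' = sv := by simpa using hsv'
                have h1 : sw' ≤ sw := hswmax sw' hsw'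
                obtain ⟨d, hd, hdle⟩ := pvStep_bound_of_le (st := st) hle
                rw [hesv]
                exact Or.inr ⟨d, hd, by omega⟩
            have hIH := ih (sw :: ss) vs (P ++ [sv]) st'
              (by simp only [List.length_cons] at hn ⊢; omega) hS (List.Pairwise.of_cons hV) hINV'
            rw [hA, hIH]
            -- both sides fold the rows over the same list P ++ sv :: vs
            have hL : (P ++ [sv]) ++ vs = P ++ sv :: vs := by simp
            rw [hL]
            -- first rows agree: rowB sw (P ++ sv::vs) st = rowB sw (P ++ sv::vs) st'
            have hrow : pvRowB target sw (P ++ sv :: vs) st = pvRowB target sw (P ++ sv :: vs) st' := by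
              have hPdead : pvRowB target sw P st = st := pvRowB_noop (hINV sw (by simp))
              have hPdead' : pvRowB target sw P st' = st' := by
                refine pvRowB_noop ?_
                intro x hx
                exact pvDead_step (hINV sw (by simp) x hx)
              have hsvdead' : pvStepB target sw sv st' = st' := by
                refine pvStep_dead (Or.inr ?_)
                exact pvStep_bound_of_le hle
              rw [pvRowB_append, pvRowB_append, hPdead, hPdead']
              show pvRowB target sw vs (pvStepB target sw sv st) = pvRowB target sw vs (pvStepB target sw sv st')
              rw [hst', hsvdead']
            simp only [List.foldl_cons, hrow]
          · -- infeasible: A advances sweet; sw's whole row is dead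
            have hA : pvLoopA target (sw :: ss) (sv :: vs) st.1 st.2 =
                pvLoopA target ss (sv :: vs) st.1 st.2 := by
              conv_lhs => rw [pvLoopA.eq_def]
              simp only [if_neg hle]
            have hrow : pvRowB target sw (P ++ sv :: vs) st = st := by
              refine pvRowB_noop ?_
              intro x hx
              rcases List.mem_append.mp hx with hx | hx
              · exact hINV sw (by simp) x hx
              · exact Or.inl (by have := hsvmin x hx; omega)
            have hIH := ih ss (sv :: vs) P st (by simp only [List.length_cons] at hn ⊢; omega)
              (List.Pairwise.of_cons hS) hV
              (fun sw' hsw' => hINV sw' (by simp [hsw']))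
            rw [hA, hIH]
            simp only [List.foldl_cons, hrow]

-- A's partition fold produces exactly B's two filters
lemma pvPartition_eq (dishes : List Int) : ∀ (a b : List Int),
    dishes.foldl
      (fun (p : List Int × List Int) dish =>
        if dish < 0 then (p.1 ++ [dish], p.2) else (p.1, p.2 ++ [dish]))
      (a, b)
    = (a ++ dishes.filter (fun d => d < 0), b ++ dishes.filter (fun d => 0 ≤ d)) := by
  induction dishes with
  | nil => intro a b; simp
  | cons x xs ih =>
      intro a b
      by_cases hx : x < 0
      · have hx' : ¬ (0 ≤ x) := by omega
        simp [hx, hx', ih]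
      · have hx' : 0 ≤ x := by omega
        simp [hx, hx', ih]

-- ===== VERDICT (by name: the statement is the Claim_ definition above) =====
theorem sweetAndSavory_spec : Claim_equal_sweetAndSavory := by
  intro dishes target _
  unfold Spec_sweetAndSavory sweetAndSavory sweetAndSavory_alt
  rw [pvPartition_eq dishes [] []]
  simp only [List.nil_append]
  set sweet := PySem.List.sorted (dishes.filter (fun d => d < 0)) (fun x => |x|) false with hsw
  set savory := PySem.List.sorted (dishes.filter (fun d => 0 ≤ d)) (fun x => x) false with hsv
  have hSpair : sweet.Pairwise (fun a b => b ≤ a) := by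
    have hkey : sweet.Pairwise (fun a b => |a| ≤ |b|) := PySem.List.sorted_pairwise _ _
    have hneg : ∀ x ∈ sweet, x < 0 := by
      intro x hx
      rw [hsw, PySem.List.mem_sorted] at hx
      have := List.of_mem_filter hx
      simpa using this
    refine List.Pairwise.imp_of_mem ?_ hkey
    intro a b ha hb hab
    have h1 := hneg a ha
    have h2 := hneg b hb
    rw [abs_of_neg h1, abs_of_neg h2] at hab
    omega
  have hVpair : savory.Pairwise (fun a b => a ≤ b) := PySem.List.sorted_pairwise _ _
  have := pvLoop_eq target (sweet.length + savory.length) sweet savory []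
    ((none : Option Int), ([0, 0] : List Int)) (le_refl _) hSpair hVpair (by simp)
  simpa [pvRowB] using this
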